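-- pv_equiv track=rewrite | github.com/jdabrante/PRO | ut4/REPASO/ut2/examen/ejercicio4.py | doubleage
-- ===== SOURCE A (Python) =====
-- def doubleage (mom: int, daughter: int):
--     new_mom = mom - daughter
--     new_daughter = 0
--     for age in range(mom+1):
--         if new_daughter*2 == new_mom:
--             return  new_mom,new_daughter
--         else:
--             new_mom += 1
--             new_daughter += 1
--     return None
-- ===== SOURCE B (Python) =====
-- def doubleage(mom: int, daughter: int):
--     d = mom - daughter
--     if 0 <= d <= mom:
--         return 2 * d, d
--     return None
-- ===== Notes on version B (the rewrite author's own statement) =====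
-- stated objective: faster
-- what changed: Replaced the linear step-by-step age simulation with the closed form d = mom - daughter, returning (2d, d) when 0 <= d <= mom and None otherwise.
import Mathlib
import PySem

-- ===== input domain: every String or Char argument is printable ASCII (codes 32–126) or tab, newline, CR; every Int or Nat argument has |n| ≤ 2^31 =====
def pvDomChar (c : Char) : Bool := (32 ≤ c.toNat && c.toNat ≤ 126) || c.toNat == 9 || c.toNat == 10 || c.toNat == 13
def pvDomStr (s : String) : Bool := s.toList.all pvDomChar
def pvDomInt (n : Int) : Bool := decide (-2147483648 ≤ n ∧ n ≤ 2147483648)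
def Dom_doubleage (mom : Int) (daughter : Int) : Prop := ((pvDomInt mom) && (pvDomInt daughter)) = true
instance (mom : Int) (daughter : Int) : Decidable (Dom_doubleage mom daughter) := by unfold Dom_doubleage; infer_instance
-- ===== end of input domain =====

-- B replaces A's linear simulation loop by the closed form d = mom - daughter (asymptotically faster).


-- ===== PORT A =====
-- the for-loop with early return: state (new_mom, new_daughter), one step per range element
def doubleageLoop (ages : List Int) (new_mom : Int) (new_daughter : Int) : Option (List Int) :=
  match ages with
  | [] => none
  | _ :: rest =>
      if new_daughter * 2 = new_mom then some [new_mom, new_daughter]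
      else doubleageLoop rest (new_mom + 1) (new_daughter + 1)

def doubleage (mom : Int) (daughter : Int) : Option (List Int) :=
  doubleageLoop (PySem.List.pyRange 0 (mom + 1) 1) (mom - daughter) 0

-- ===== PORT B =====
def doubleage_alt (mom : Int) (daughter : Int) : Option (List Int) :=
  let d := mom - daughter
  if 0 ≤ d ∧ d ≤ mom then some [2 * d, d] else none

-- ===== PRECONDITION & SPEC =====
def Spec_doubleage (mom : Int) (daughter : Int) (out : Option (List Int)) : Prop := out = doubleage_alt mom daughter
instance (mom : Int) (daughter : Int) (out : Option (List Int)) : Decidable (Spec_doubleage mom daughter out) := by unfold Spec_doubleage; infer_instance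

-- ===== CLAIM (what is proved, stated in full; the proofs are below) =====
def Claim_equal_doubleage : Prop := ∀ (mom : Int) (daughter : Int), Dom_doubleage mom daughter → Spec_doubleage mom daughter (doubleage mom daughter)

-- ===== LEMMAS AND PROOFS =====
-- invariant: after j steps the state is (nm+j, nd+j); the test fires exactly at j = nm - 2*nd
theorem doubleageLoop_eq (ages : List Int) (nm nd : Int) :
    doubleageLoop ages nm nd =
      if 0 ≤ nm - 2 * nd ∧ nm - 2 * nd < (ages.length : Int) then some [2 * (nm - nd), nm - nd]
      else none := by
  induction ages generalizing nm nd with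
  | nil => simp [doubleageLoop]
  | cons a rest ih =>
      simp only [doubleageLoop, List.length_cons]
      by_cases h : nd * 2 = nm
      · rw [if_pos h, if_pos (by push_cast; omega),
            show 2 * (nm - nd) = nm by omega, show nm - nd = nd by omega]
      · rw [if_neg h, ih,
            show nm + 1 - (nd + 1) = nm - nd by ring,
            show nm + 1 - 2 * (nd + 1) = nm - 2 * nd - 1 by ring]
        split_ifs with h1 h2 h2 <;> first | rfl | (exfalso; push_cast at h1 h2; omega)

theorem doubleage_spec' (mom daughter : Int) : doubleage mom daughter = doubleage_alt mom daughter := by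
  unfold doubleage doubleage_alt
  rw [doubleageLoop_eq, PySem.List.length_pyRange_one]
  simp only [sub_zero, mul_zero]
  split_ifs with h1 h2 h2 <;> first | rfl | (exfalso; omega)

-- ===== VERDICT (by name: the statement is the Claim_ definition above) =====
theorem doubleage_spec : Claim_equal_doubleage := by
  intro mom daughter _
  unfold Spec_doubleage
  exact doubleage_spec' mom daughter
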